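-- pv_equiv track=rewrite | github.com/strikersps/Competitive-Programming | Code-Chef/At-The-Gates/at_the_gates.py | compute_total_heads
-- ===== SOURCE A (Python) =====
-- def compute_total_heads(coin_config, k):
--     for operation in range(k):
--         if coin_config[-1] == 'H':
--             for index in range(len(coin_config) - 1):
--                 if coin_config[index] == 'H':
--                     coin_config[index] = 'T'
--                 else:
--                     coin_config[index] = 'H'
--         coin_config.pop()
--     return coin_config.count('H')
-- ===== SOURCE B (Python) =====
-- def compute_total_heads(coin_config, k):
--     n = len(coin_config)
--     flipped = False
--     for t in range(k):
--         if (coin_config[n - 1 - t] == 'H') != flipped: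
--             flipped = not flipped
--     kept = coin_config[:n - k]
--     if flipped:
--         return sum(1 for s in kept if s != 'H')
--     return sum(1 for s in kept if s == 'H')
-- ===== Notes on version B (the rewrite author's own statement) =====
-- stated objective: alternative
-- what changed: B replaces A's k-fold in-place prefix flipping and popping by a single right-to-left pass that tracks the flip parity over the k operations and then counts the surviving prefix once against that parity; A flips the prefix only on operations whose last coin reads heads, so on head-sparse inputs both are linear and no speed-up was measured.
import Mathlib
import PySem

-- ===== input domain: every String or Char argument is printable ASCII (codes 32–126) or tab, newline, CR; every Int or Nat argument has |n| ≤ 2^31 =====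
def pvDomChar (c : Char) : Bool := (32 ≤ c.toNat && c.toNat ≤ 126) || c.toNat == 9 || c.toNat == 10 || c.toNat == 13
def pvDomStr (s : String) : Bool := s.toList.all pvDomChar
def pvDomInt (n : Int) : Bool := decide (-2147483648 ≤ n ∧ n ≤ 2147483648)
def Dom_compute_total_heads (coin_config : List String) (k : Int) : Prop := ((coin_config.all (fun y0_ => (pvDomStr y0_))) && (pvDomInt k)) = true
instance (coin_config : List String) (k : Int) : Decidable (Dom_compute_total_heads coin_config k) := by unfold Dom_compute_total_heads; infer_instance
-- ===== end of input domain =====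

-- B replaces A's repeated in-place prefix-flipping and popping with a single right-to-left
-- pass that tracks the flip parity and then counts the surviving prefix once against that
-- parity (objective: alternative).
-- Note: A mutates its list argument in place (flips entries and pops); B does not — the
-- equivalence proved here is about the RETURN value only.

-- ===== PORT A =====
def pvFlipOne (x : String) : String := if x = "H" then "T" else "H"

-- A's inner index loop 'for index in range(len(cc)-1): flip cc[index]' ported as structural
-- recursion over the same elements in the same order (every element except the last is flipped).
def pvFlipPrefix : List String → List String
  | [] => []
  | [x] => [x]
  | x :: y :: xs => pvFlipOne x :: pvFlipPrefix (y :: xs)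

-- one iteration of A's outer loop; cc[-1] is PySem.List.pyGet? cc (-1) (none on []: excluded by
-- Pre_), and .pop() on the nonempty list drops the last element.
def pvStepA (xs : List String) : List String :=
  (if PySem.List.pyGet? xs (-1) = some "H" then pvFlipPrefix xs else xs).dropLast

def compute_total_heads (coin_config : List String) (k : Int) : Int :=
  ((PySem.List.count ((PySem.List.pyRange 0 k 1).foldl (fun xs _ => pvStepA xs) coin_config) "H" : Nat) : Int)

-- ===== PORT B =====
def compute_total_heads_alt (coin_config : List String) (k : Int) : Int :=
  let n : Int := coin_config.length
  let flipped := (PySem.List.pyRange 0 k 1).foldl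
    (fun flipped t =>
      if (PySem.List.pyGet? coin_config (n - 1 - t) == some "H") != flipped then !flipped else flipped)
    false
  let kept := PySem.List.slice coin_config none (some (n - k))
  if flipped then ((kept.countP (fun s => s != "H") : Nat) : Int)
  else ((kept.countP (fun s => s == "H") : Nat) : Int)

-- ===== PRECONDITION & SPEC =====
-- A indexes cc[-1] and pops once per operation: with k > len(cc) it raises IndexError; all other
-- inputs (including k ≤ 0, where range(k) is empty) return normally.
def Pre_compute_total_heads (coin_config : List String) (k : Int) : Prop :=
  k ≤ (coin_config.length : Int)
instance (coin_config : List String) (k : Int) : Decidable (Pre_compute_total_heads coin_config k) := by unfold Pre_compute_total_heads; infer_instance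

def pvWitness_compute_total_heads : List String × Int := (["H", "T", "H"], 2)

def Spec_compute_total_heads (coin_config : List String) (k : Int) (out : Int) : Prop := out = compute_total_heads_alt coin_config k
instance (coin_config : List String) (k : Int) (out : Int) : Decidable (Spec_compute_total_heads coin_config k out) := by unfold Spec_compute_total_heads; infer_instance

-- ===== CLAIM (what is proved, stated in full; the proofs are below) =====
def Claim_equal_compute_total_heads : Prop := ∀ (coin_config : List String) (k : Int), Dom_compute_total_heads coin_config k → Pre_compute_total_heads coin_config k → Spec_compute_total_heads coin_config k (compute_total_heads coin_config k)

-- ===== LEMMAS AND PROOFS =====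

-- "is heads" bit of a coin string
def pvIsH (x : String) : Bool := x == "H"

-- the flip parity after t operations: false initially, afterwards the original bit of the coin
-- examined (and removed) by operation t-1, i.e. of cc[n-t].
def pvP (cc : List String) (t : Nat) : Bool :=
  if t = 0 then false else pvIsH (cc.getD (cc.length - t) "T")

lemma pvIsH_flipOne (x : String) : pvIsH (pvFlipOne x) = !(pvIsH x) := by
  unfold pvIsH pvFlipOne
  by_cases h : x = "H" <;> simp [h]

lemma pvFlipPrefix_append (ys : List String) (x : String) :
    pvFlipPrefix (ys ++ [x]) = ys.map pvFlipOne ++ [x] := by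
  induction ys with
  | nil => rfl
  | cons y ys ih =>
    cases ys with
    | nil => rfl
    | cons z zs => simpa [pvFlipPrefix] using congrArg (pvFlipOne y :: ·) ih

lemma pvStepA_append (ys : List String) (x : String) :
    pvStepA (ys ++ [x]) = if x = "H" then ys.map pvFlipOne else ys := by
  unfold pvStepA
  by_cases h : x = "H" <;>
    simp [h, PySem.List.pyGet?_neg_one_append_singleton, pvFlipPrefix_append]

lemma pvInvA (cc : List String) (t : Nat) (ht : t ≤ cc.length) :
    ((PySem.List.pyRange 0 (t : Int) 1).foldl (fun xs _ => pvStepA xs) cc).map pvIsH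
      = (cc.take (cc.length - t)).map (fun x => xor (pvIsH x) (pvP cc t)) := by
  induction t with
  | zero => simp [pvP]
  | succ t ih =>
    have ht' : t ≤ cc.length := Nat.le_of_succ_le ht
    have hcast : ((t + 1 : Nat) : Int) = (t : Int) + 1 := by push_cast; ring
    rw [hcast, PySem.List.pyRange_one_succ_right (Int.natCast_nonneg t),
      List.foldl_append, List.foldl_cons, List.foldl_nil]
    have ih' := ih ht'
    set S := (PySem.List.pyRange 0 (t : Int) 1).foldl (fun xs _ => pvStepA xs) cc with hS
    have hlt : cc.length - 1 - t < cc.length := by omega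
    have htake : cc.take (cc.length - t)
        = (cc.take (cc.length - 1 - t)).concat cc[cc.length - 1 - t] := by
      rw [List.take_concat_get hlt]
      congr 1
      omega
    -- decompose the A-state as ys ++ [x]
    rcases List.eq_nil_or_concat S with hnil | ⟨ys, x, hcons⟩
    · exfalso
      rw [hnil] at ih'
      have := congrArg List.length ih'
      simp at this
      omega
    rw [hcons] at ih' ⊢
    rw [htake] at ih'
    simp only [List.concat_eq_append, List.map_append, List.map_cons, List.map_nil] at ih'
    obtain ⟨hpre, hlast⟩ := List.append_inj' ih' rfl
    have hlast' : pvIsH x = xor (pvIsH cc[cc.length - 1 - t]) (pvP cc t) := by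
      simpa using hlast
    have hp1 : pvP cc (t + 1) = pvIsH cc[cc.length - 1 - t] := by
      have hi : cc.length - (t + 1) = cc.length - 1 - t := by omega
      unfold pvP
      rw [if_neg (Nat.succ_ne_zero t), hi, List.getD_eq_getElem cc "T" hlt]
    have hi2 : cc.length - (t + 1) = cc.length - 1 - t := by omega
    rw [List.concat_eq_append, pvStepA_append, hi2]
    by_cases hx : x = "H"
    · -- the examined coin reads heads: the prefix is flipped, parity toggles
      have hxH : pvIsH x = true := by simp [pvIsH, hx]
      rw [if_pos hx]
      have hbit : pvIsH cc[cc.length - 1 - t] = !(pvP cc t) := by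
        rw [hxH] at hlast'
        cases h1 : pvIsH cc[cc.length - 1 - t] <;> cases h2 : pvP cc t <;>
          rw [h1, h2] at hlast' <;> revert hlast' <;> decide
      rw [List.map_map]
      have : (pvIsH ∘ pvFlipOne) = (fun y => !(pvIsH y)) := by
        funext y; exact pvIsH_flipOne y
      rw [this]
      have hys : ys.map pvIsH = (cc.take (cc.length - 1 - t)).map
          (fun y => xor (pvIsH y) (pvP cc t)) := hpre
      calc ys.map (fun y => !(pvIsH y))
          = (ys.map pvIsH).map (fun b => !b) := by rw [List.map_map]; rfl
        _ = (cc.take (cc.length - 1 - t)).map (fun y => !(xor (pvIsH y) (pvP cc t))) := by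
            rw [hys, List.map_map]; rfl
        _ = (cc.take (cc.length - 1 - t)).map (fun y => xor (pvIsH y) (pvP cc (t + 1))) := by
            apply List.map_congr_left
            intro y _
            rw [hp1, hbit]
            cases pvIsH y <;> cases pvP cc t <;> rfl
    · -- the examined coin reads tails: only the pop happens, parity is unchanged
      have hxH : pvIsH x = false := by simp [pvIsH, hx]
      rw [if_neg hx]
      have hbit : pvIsH cc[cc.length - 1 - t] = pvP cc t := by
        rw [hxH] at hlast'
        cases h1 : pvIsH cc[cc.length - 1 - t] <;> cases h2 : pvP cc t <;>
          rw [h1, h2] at hlast' <;> revert hlast' <;> decide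
      rw [hpre]
      apply List.map_congr_left
      intro y _
      rw [hp1, hbit]

-- B's loop body: after examining a coin the parity equals that coin's original heads bit
lemma pvToggle_collapse (c p : Bool) : (if (c != p) = true then !p else p) = c := by cases c <;> cases p <;> rfl

lemma pvInvB (cc : List String) (t : Nat) (ht : t ≤ cc.length) :
    (PySem.List.pyRange 0 (t : Int) 1).foldl
      (fun flipped u =>
        if (PySem.List.pyGet? cc ((cc.length : Int) - 1 - u) == some "H") != flipped then !flipped else flipped)
      false = pvP cc t := by
  induction t with
  | zero => simp [pvP]
  | succ t ih =>
    have ht' : t ≤ cc.length := Nat.le_of_succ_le ht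
    have hcast : ((t + 1 : Nat) : Int) = (t : Int) + 1 := by push_cast; ring
    rw [hcast, PySem.List.pyRange_one_succ_right (Int.natCast_nonneg t),
      List.foldl_append, List.foldl_cons, List.foldl_nil, ih ht']
    have hidx : ((cc.length : Int) - 1 - (t : Int)) = ((cc.length - 1 - t : Nat) : Int) := by
      omega
    have hlt : cc.length - 1 - t < cc.length := by omega
    rw [hidx, PySem.List.pyGet?_natCast, List.getElem?_eq_getElem hlt]
    have hp : pvP cc (t + 1) = (cc[cc.length - 1 - t] == "H") := by
      have hi : cc.length - (t + 1) = cc.length - 1 - t := by omega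
      unfold pvP pvIsH
      rw [if_neg (Nat.succ_ne_zero t), hi, List.getD_eq_getElem cc "T" hlt]
    rw [hp]
    simp only [Option.some_beq_some]
    exact pvToggle_collapse _ _

-- ===== VERDICT (by name: the statement is the Claim_ definition above) =====
theorem compute_total_heads_spec : Claim_equal_compute_total_heads := by
  intro cc k _ hpre
  unfold Pre_compute_total_heads at hpre
  unfold Spec_compute_total_heads compute_total_heads compute_total_heads_alt
  by_cases hk : k ≤ 0
  · -- k ≤ 0: range(k) is empty, both programs count heads of the whole list
    have hb : (0 : Int) ≤ (cc.length : Int) - k := by omega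
    have htk : cc.length ≤ ((cc.length : Int) - k).toNat := by omega
    rw [PySem.List.pyRange_one_eq_nil hk]
    simp only [List.foldl_nil, Bool.false_eq_true, if_false]
    rw [PySem.List.slice_to cc hb, List.take_of_length_le htk,
      PySem.List.count_eq, List.count_eq_countP]
  · -- 0 < k ≤ len: both folds run k times; rewrite with the two invariants
    have hk0 : (0 : Int) ≤ k := by omega
    have hkm : k = (k.toNat : Int) := (Int.toNat_of_nonneg hk0).symm
    set m := k.toNat with hm'
    have hm : m ≤ cc.length := by omega
    rw [hkm]
    simp only [PySem.List.count_eq, List.count_eq_countP]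
    rw [pvInvB cc m hm,
      PySem.List.slice_to cc (by omega), show ((cc.length : Int) - (m : Int)).toNat
        = cc.length - m from by omega]
    have hA : List.countP (fun x => x == "H")
        ((PySem.List.pyRange 0 (m : Int) 1).foldl (fun xs _ => pvStepA xs) cc)
        = List.countP (fun y => xor (pvIsH y) (pvP cc m)) (cc.take (cc.length - m)) := by
      have h1 : List.countP (fun x => x == "H")
          ((PySem.List.pyRange 0 (m : Int) 1).foldl (fun xs _ => pvStepA xs) cc)
          = List.countP id (((PySem.List.pyRange 0 (m : Int) 1).foldl
              (fun xs _ => pvStepA xs) cc).map pvIsH) := by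
        rw [List.countP_map]; rfl
      rw [h1, pvInvA cc m hm, List.countP_map]; rfl
    rw [hA]
    cases hq : pvP cc m
    · have hfun : (fun y => xor (pvIsH y) false) = (fun s : String => s == "H") := by
        funext y; simp [pvIsH]
      rw [if_neg (by simp), hfun]
    · have hfun : (fun y => xor (pvIsH y) true) = (fun s : String => s != "H") := by
        funext y; simp [pvIsH, bne]
      rw [if_pos rfl, hfun]
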